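-- pv_equiv track=rewrite | github.com/ahbali/adventofcode2019 | day10/day10_1.py | asteroids
-- ===== SOURCE A (Python) =====
-- def asteroids(space_map: str) -> set:
--     """
--     returns a tuple of asteroids coordinates from the input string
--     """
--     lines = space_map.split("\n")
--     x, y = 0, 0
--     points = []
--     for line in lines:
--         for char in line:
--             if char == "#":
--                 point = (x, y)
--                 points.append(point)
--             y += 1
--         x += 1
--         y = 0
--     return set(points)
-- ===== SOURCE B (Python) =====
-- def asteroids(space_map: str) -> set:
--     """
--     returns the set of asteroid coordinates from the input string
--     """
--     # index-arithmetic algorithm: collect the absolute positions of newlines and of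
--     # '#' marks, then translate each '#' position to (row, col) by a sorted merge
--     # against the newline positions: row = newlines passed, col = offset from the
--     # start of the current line.
--     newlines = [i for i, c in enumerate(space_map) if c == "\n"]
--     hashes = [i for i, c in enumerate(space_map) if c == "#"]
--     pts = set()
--     row = 0
--     start = 0          # absolute index where the current line begins
--     j = 0              # cursor into newlines
--     for h in hashes:
--         while j < len(newlines) and newlines[j] < h:
--             row += 1
--             start = newlines[j] + 1
--             j += 1
--         pts.add((row, h - start))
--     return pts
-- ===== Notes on version B (the rewrite author's own statement) =====
-- stated objective: alternative
-- what changed: B computes coordinates by index arithmetic instead of scanning a grid: it first collects the absolute positions of newline characters and of asteroid marks (via enumerate), then converts each mark position to (row, col) with a two-pointer sorted merge against the newline positions (row = newlines passed, col = offset from the current line start), replacing A's split-into-lines plus nested per-character counter loop.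
import Mathlib
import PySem

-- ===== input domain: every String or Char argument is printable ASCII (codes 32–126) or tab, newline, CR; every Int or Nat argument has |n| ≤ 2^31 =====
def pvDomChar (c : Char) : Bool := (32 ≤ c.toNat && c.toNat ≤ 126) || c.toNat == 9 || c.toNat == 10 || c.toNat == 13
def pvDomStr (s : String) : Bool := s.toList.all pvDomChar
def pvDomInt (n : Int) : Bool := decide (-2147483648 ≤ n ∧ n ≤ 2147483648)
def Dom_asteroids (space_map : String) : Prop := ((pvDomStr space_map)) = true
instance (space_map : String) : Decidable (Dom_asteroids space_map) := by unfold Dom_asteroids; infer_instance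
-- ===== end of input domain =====

-- B replaces A's split-then-scan traversal by index arithmetic: it collects the absolute
-- positions of newlines and of '#' marks and translates each '#' position to (row, col)
-- by a sorted merge against the newline positions; same O(n) cost, alternative algorithm.

-- ===== PORT A =====
-- one character of a line: if char == "#": points.append((x,y)); y += 1
def pvStepA (st : Int × Int × List (Int × Int)) (char : Char) : Int × Int × List (Int × Int) :=
  if char = '#' then (st.1, st.2.1 + 1, st.2.2 ++ [(st.1, st.2.1)])
  else (st.1, st.2.1 + 1, st.2.2)

-- one line: the inner for-loop, then x += 1; y = 0
def pvLineA (st : Int × Int × List (Int × Int)) (line : List Char) : Int × Int × List (Int × Int) :=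
  let st2 := line.foldl pvStepA st
  (st2.1 + 1, 0, st2.2.2)

def asteroids (space_map : String) : List (Int × Int) :=
  match PySem.Str.split? space_map "\n" with
  | some lines =>
      let fin := lines.foldl (fun st line => pvLineA st line.toList) (0, 0, [])
      PySem.Set.ofList fin.2.2
  | none => []   -- unreachable: the separator "\n" is nonempty

-- ===== PORT B =====
-- the inner while loop: advance past the newlines lying before the '#' at position h
def pvAdvance (row start : Int) (nls : List Int) (h : Int) : Int × Int × List Int :=
  match nls with
  | [] => (row, start, [])
  | n :: rest => if n < h then pvAdvance (row + 1) (n + 1) rest h else (row, start, n :: rest)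

-- the for loop over the '#' positions
def pvMergeRun (row start : Int) (nls hs : List Int) (pts : PySem.Set (Int × Int)) :
    PySem.Set (Int × Int) :=
  match hs with
  | [] => pts
  | h :: rest =>
      let st := pvAdvance row start nls h
      pvMergeRun st.1 st.2.1 st.2.2 rest (PySem.Set.add pts (st.1, h - st.2.1))

def asteroids_alt (space_map : String) : List (Int × Int) :=
  let cs := PySem.List.enumerate space_map.toList 0
  let newlines := (cs.filter (fun p => p.2 = '\n')).map (·.1)
  let hashes := (cs.filter (fun p => p.2 = '#')).map (·.1)
  pvMergeRun 0 0 newlines hashes PySem.Set.empty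

-- ===== PRECONDITION & SPEC =====
def Spec_asteroids (space_map : String) (out : List (Int × Int)) : Prop := out = asteroids_alt space_map
instance (space_map : String) (out : List (Int × Int)) : Decidable (Spec_asteroids space_map out) := by unfold Spec_asteroids; infer_instance

-- ===== CLAIM (what is proved, stated in full; the proofs are below) =====
def Claim_equal_asteroids : Prop := ∀ (space_map : String), Dom_asteroids space_map → Spec_asteroids space_map (asteroids space_map)

-- ===== LEMMAS AND PROOFS =====

-- proof intermediate: a single flat newline-aware pass over the characters
def pvFlat (st : Int × Int × PySem.Set (Int × Int)) (c : Char) : Int × Int × PySem.Set (Int × Int) :=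
  if c = '\n' then (st.1 + 1, 0, st.2.2)
  else if c = '#' then (st.1, st.2.1 + 1, PySem.Set.add st.2.2 (st.1, st.2.1))
  else (st.1, st.2.1 + 1, st.2.2)

-- a direct structural recursion computing split on '\n'
def pvSplit : List Char → List (List Char)
  | [] => [[]]
  | c :: cs =>
      if c = '\n' then [] :: pvSplit cs
      else
        match pvSplit cs with
        | p :: ps => (c :: p) :: ps
        | [] => [[c]]

def pvConsHead (pre : List Char) : List (List Char) → List (List Char)
  | p :: ps => (pre ++ p) :: ps
  | [] => [pre]

theorem pvSplit_ne_nil (l : List Char) : pvSplit l ≠ [] := by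
  cases l with
  | nil => simp [pvSplit]
  | cons c cs =>
      simp only [pvSplit]
      split
      · simp
      · cases h : pvSplit cs <;> simp

theorem pvGo_spec : ∀ (fuel : Nat) (l cur : List Char) (acc : List (List Char)),
    l.length ≤ fuel →
    PySem.Chars.splitOn.go ['\n'] fuel l cur acc = acc.reverse ++ pvConsHead cur.reverse (pvSplit l) := by
  intro fuel
  induction fuel with
  | zero =>
      intro l cur acc h
      have : l = [] := by cases l <;> simp_all
      subst this
      simp [PySem.Chars.splitOn.go, pvSplit, pvConsHead]
  | succ n ih =>
      intro l cur acc h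
      cases l with
      | nil => simp [PySem.Chars.splitOn.go, pvSplit, pvConsHead]
      | cons c rest =>
          by_cases hc : c = '\n'
          · subst hc
            rw [show PySem.Chars.splitOn.go ['\n'] (n+1) ('\n' :: rest) cur acc
                  = PySem.Chars.splitOn.go ['\n'] n rest [] (cur.reverse :: acc) by
                  simp [PySem.Chars.splitOn.go, List.isPrefixOf]]
            rw [ih rest [] (cur.reverse :: acc) (by simpa using Nat.le_of_succ_le_succ h)]
            cases hps : pvSplit rest with
            | nil => exact absurd hps (pvSplit_ne_nil rest)
            | cons p ps => simp [pvSplit, pvConsHead, hps]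
          · rw [show PySem.Chars.splitOn.go ['\n'] (n+1) (c :: rest) cur acc
                  = PySem.Chars.splitOn.go ['\n'] n rest (c :: cur) acc by
                  simp [PySem.Chars.splitOn.go, List.isPrefixOf, Ne.symm hc]]
            rw [ih rest (c :: cur) acc (by simpa using Nat.le_of_succ_le_succ h)]
            cases hps : pvSplit rest with
            | nil => exact absurd hps (pvSplit_ne_nil rest)
            | cons p ps => simp [pvSplit, pvConsHead, hps, hc]

theorem pvSplitOn_eq (l : List Char) : PySem.Chars.splitOn l ['\n'] = pvSplit l := by
  have := pvGo_spec (l.length + 1) l [] [] (Nat.le_succ _)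
  rw [PySem.Chars.splitOn] at *
  rw [this]
  cases hps : pvSplit l with
  | nil => exact absurd hps (pvSplit_ne_nil l)
  | cons p ps => simp [pvConsHead]

-- A's nested run equals the flat pass, in lockstep over the characters
theorem pvRun_eq : ∀ (l : List Char) (x y : Int) (pts : List (Int × Int)),
    (l.foldl pvFlat (x, y, pts.foldl PySem.Set.add [])).2.2
      = (((pvSplit l).foldl pvLineA (x, y, pts)).2.2).foldl PySem.Set.add [] := by
  intro l
  induction l with
  | nil =>
      intro x y pts
      simp [pvSplit, pvLineA]
  | cons c cs ih =>
      intro x y pts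
      by_cases hc : c = '\n'
      · subst hc
        have : pvFlat (x, y, pts.foldl PySem.Set.add []) '\n' = (x + 1, 0, pts.foldl PySem.Set.add []) := by
          simp [pvFlat]
        simp only [List.foldl_cons, this, pvSplit]
        exact ih (x + 1) 0 pts
      · cases hps : pvSplit cs with
        | nil => exact absurd hps (pvSplit_ne_nil cs)
        | cons p ps =>
            by_cases hh : c = '#'
            · subst hh
              have hB : pvFlat (x, y, pts.foldl PySem.Set.add []) '#'
                  = (x, y + 1, (pts ++ [(x, y)]).foldl PySem.Set.add []) := by
                simp [pvFlat, List.foldl_append]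
              have hA : pvStepA (x, y, pts) '#' = (x, y + 1, pts ++ [(x, y)]) := by
                simp [pvStepA]
              simp only [List.foldl_cons, hB, pvSplit, if_neg hc, hps, pvLineA, hA]
              have := ih x (y + 1) (pts ++ [(x, y)])
              simpa [pvLineA, hps] using this
            · have hB : pvFlat (x, y, pts.foldl PySem.Set.add []) c
                  = (x, y + 1, pts.foldl PySem.Set.add []) := by
                simp [pvFlat, hc, hh]
              have hA : pvStepA (x, y, pts) c = (x, y + 1, pts) := by
                simp [pvStepA, hh]
              simp only [List.foldl_cons, hB, pvSplit, if_neg hc, hps, pvLineA, hA]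
              have := ih x (y + 1) pts
              simpa [pvLineA, hps] using this

-- the positions (from offset k) of a given character
def pvIdxOf (t : Char) : List Char → Int → List Int
  | [], _ => []
  | c :: cs, k => if c = t then k :: pvIdxOf t cs (k + 1) else pvIdxOf t cs (k + 1)

theorem pvIdxOf_eq_enum (t : Char) : ∀ (cs : List Char) (k : Int),
    ((PySem.List.enumerate cs k).filter (fun p => p.2 = t)).map (·.1) = pvIdxOf t cs k := by
  intro cs
  induction cs with
  | nil => intro k; simp [pvIdxOf, PySem.List.enumerate_nil]
  | cons c rest ih =>
      intro k
      by_cases hc : c = t <;>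
        simp [PySem.List.enumerate_cons, pvIdxOf, hc, ih (k + 1)]

theorem pvIdxOf_ge (t : Char) : ∀ (cs : List Char) (k m : Int), m ∈ pvIdxOf t cs k → k ≤ m := by
  intro cs
  induction cs with
  | nil => intro k m h; simp [pvIdxOf] at h
  | cons c rest ih =>
      intro k m h
      simp only [pvIdxOf] at h
      split at h
      · rcases List.mem_cons.mp h with h | h
        · omega
        · have := ih (k + 1) m h; omega
      · have := ih (k + 1) m h; omega

theorem pvAdvance_stop (row start : Int) (nls : List Int) (h : Int)
    (hge : ∀ n ∈ nls, h ≤ n) : pvAdvance row start nls h = (row, start, nls) := by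
  cases nls with
  | nil => simp [pvAdvance]
  | cons n rest =>
      have : ¬ n < h := not_lt.mpr (hge n (List.mem_cons_self ..))
      simp [pvAdvance, this]

theorem pvMergeRun_skip (row start k : Int) (rest hs : List Int) (pts : PySem.Set (Int × Int))
    (hlt : ∀ h ∈ hs, k < h) :
    pvMergeRun row start (k :: rest) hs pts = pvMergeRun (row + 1) (k + 1) rest hs pts := by
  cases hs with
  | nil => simp [pvMergeRun]
  | cons h hs' =>
      have hk : k < h := hlt h (List.mem_cons_self ..)
      simp only [pvMergeRun]
      rw [show pvAdvance row start (k :: rest) h = pvAdvance (row + 1) (k + 1) rest h by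
        simp [pvAdvance, hk]]

-- the flat pass equals B's merge over the collected positions
theorem pvFlat_eq_merge : ∀ (cs : List Char) (k x start : Int) (S : PySem.Set (Int × Int)),
    (cs.foldl pvFlat (x, k - start, S)).2.2
      = pvMergeRun x start (pvIdxOf '\n' cs k) (pvIdxOf '#' cs k) S := by
  intro cs
  induction cs with
  | nil => intro k x start S; simp [pvIdxOf, pvMergeRun]
  | cons c rest ih =>
      intro k x start S
      by_cases hc : c = '\n'
      · subst hc
        have hstep : pvFlat (x, k - start, S) '\n' = (x + 1, 0, S) := by simp [pvFlat]
        have hhash : ∀ h ∈ pvIdxOf '#' rest (k + 1), k < h := by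
          intro h hm; have := pvIdxOf_ge '#' rest (k + 1) h hm; omega
        simp only [List.foldl_cons, hstep, pvIdxOf, reduceIte,
          if_neg (by decide : ¬ ('\n' = '#'))]
        rw [pvMergeRun_skip x start k _ _ S hhash]
        have := ih (k + 1) (x + 1) (k + 1) S
        simpa using this
      · by_cases hh : c = '#'
        · subst hh
          have hstep : pvFlat (x, k - start, S) '#'
              = (x, (k - start) + 1, PySem.Set.add S (x, k - start)) := by simp [pvFlat]
          have hnl : ∀ n ∈ pvIdxOf '\n' rest (k + 1), k ≤ n := by
            intro n hm; have := pvIdxOf_ge '\n' rest (k + 1) n hm; omega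
          simp only [List.foldl_cons, hstep, pvIdxOf, reduceIte,
            if_neg (by decide : ¬ ('#' = '\n'))]
          simp only [pvMergeRun, pvAdvance_stop x start _ k hnl]
          have := ih (k + 1) x start (PySem.Set.add S (x, k - start))
          have harith : (k + 1) - start = (k - start) + 1 := by omega
          rw [harith] at this
          exact this
        · have hstep : pvFlat (x, k - start, S) c = (x, (k - start) + 1, S) := by
            simp [pvFlat, hc, hh]
          simp only [List.foldl_cons, hstep, pvIdxOf, if_neg hc, if_neg hh]
          have := ih (k + 1) x start S
          have harith : (k + 1) - start = (k - start) + 1 := by omega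
          rw [harith] at this
          exact this

-- ===== VERDICT (by name: the statement is the Claim_ definition above) =====
theorem asteroids_spec : Claim_equal_asteroids := by
  intro s _
  unfold Spec_asteroids
  unfold asteroids asteroids_alt
  have hsplit : PySem.Str.split? s "\n"
      = some ((PySem.Chars.splitOn s.toList ['\n']).map String.ofList) := by
    simp [PySem.Str.split?, PySem.Chars.split?]
  rw [hsplit]
  simp only [List.foldl_map, String.toList_ofList, pvSplitOn_eq]
  have hA := pvRun_eq s.toList 0 0 []
  simp only [List.foldl_nil] at hA
  have hB := pvFlat_eq_merge s.toList 0 0 0 PySem.Set.empty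
  simp only [show (0:Int) - 0 = 0 by omega] at hB
  have hempty : (PySem.Set.empty : PySem.Set (Int × Int)) = [] := rfl
  rw [hempty] at hB
  rw [PySem.Set.ofList_eq_foldl, ← hA, hB, ← pvIdxOf_eq_enum, ← pvIdxOf_eq_enum]
  exact congrArg _ hempty.symm
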